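-- pv_equiv track=rewrite | github.com/CarlosDevTI/Preselecta_Experian | api/services/datacredito_report.py | _format_behavior_legacy
-- ===== SOURCE A (Python) =====
-- def _format_behavior_legacy(value: str | None) -> str:
--     if value is None:
--         return "-"
--     raw = str(value).replace(" ", "").strip()
--     if raw in ("", "-", "--", "N", "NN", "N/A"):
--         return raw or "-"
--
--     chunk_len = 12
--     chunks = [raw[i : i + chunk_len] for i in range(0, len(raw), chunk_len)]
--     if not chunks:
--         return "-"
--
--     lines = []
--     for i in range(0, len(chunks), 2):
--         left = chunks[i].ljust(chunk_len, "-")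
--         right = chunks[i + 1].ljust(chunk_len, "-") if i + 1 < len(chunks) else "-" * chunk_len
--         lines.append(f"[{left}][{right}]")
--     return "<br>".join(lines)
-- ===== SOURCE B (Python) =====
-- def _format_behavior_legacy(value):
--     if value is None:
--         return "-"
--     raw = str(value).replace(" ", "").strip()
--     if raw in ("", "-", "--", "N", "NN", "N/A"):
--         return raw or "-"
--     # Pad once to a multiple of 24; then every line is just the next 24 chars.
--     p = raw + "-" * (-len(raw) % 24)
--     lines = []
--     while p:
--         lines.append("[" + p[:12] + "][" + p[12:24] + "]")
--         p = p[24:]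
--     return "<br>".join(lines)
-- ===== Notes on version B (the rewrite author's own statement) =====
-- stated objective: alternative
-- what changed: Instead of pre-chunking into 12-char pieces, pairing them by index and ljust-padding each chunk, B pads the whole string once up front to a multiple of 24 with dashes (which makes the conditional right-half and all per-chunk padding disappear) and then destructively peels 24 characters per line off the string in a while loop.
import Mathlib
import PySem

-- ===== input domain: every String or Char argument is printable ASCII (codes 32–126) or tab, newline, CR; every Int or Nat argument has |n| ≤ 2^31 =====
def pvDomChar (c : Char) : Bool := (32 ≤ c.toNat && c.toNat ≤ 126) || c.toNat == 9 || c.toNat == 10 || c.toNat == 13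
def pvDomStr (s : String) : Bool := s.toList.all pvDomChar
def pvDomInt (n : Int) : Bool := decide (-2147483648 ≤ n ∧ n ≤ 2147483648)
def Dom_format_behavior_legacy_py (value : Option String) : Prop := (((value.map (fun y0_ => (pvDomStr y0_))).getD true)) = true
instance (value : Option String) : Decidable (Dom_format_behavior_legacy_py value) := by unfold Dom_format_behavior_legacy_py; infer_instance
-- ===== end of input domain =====

-- B replaces A's chunk-then-pair-then-ljust construction by padding the string once up front to a
-- multiple of 24 and peeling 24 characters per line off it in a while loop (objective: alternative).

-- ===== PORT A =====
-- port of Python's builtin s.ljust(12, '-')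
def pvLjustDash (s : String) (w : Nat) : String :=
  String.ofList (s.toList ++ List.replicate (w - s.toList.length) '-')

def format_behavior_legacy_py (value : Option String) : String :=
  match value with
  | none => "-"
  | some v =>
    let raw := PySem.Str.strip (PySem.Str.replace v " " "")
    if raw ∈ (["", "-", "--", "N", "NN", "N/A"] : List String) then
      (if raw = "" then "-" else raw)
    else
      let chunkLen : Int := 12
      let chunks := (PySem.List.pyRange 0 (PySem.Str.len raw) chunkLen).map
        (fun i => PySem.Str.slice raw (some i) (some (i + chunkLen)))
      if chunks = [] then "-"
      else
        let lines := (PySem.List.pyRange 0 (chunks.length : Int) 2).foldl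
          (fun lines i =>
            let left := pvLjustDash (PySem.List.pyGetD chunks i "") 12
            let right := if i + 1 < (chunks.length : Int)
              then pvLjustDash (PySem.List.pyGetD chunks (i + 1) "") 12
              else String.ofList (List.replicate 12 '-')
            lines ++ ["[" ++ left ++ "][" ++ right ++ "]"]) []
        PySem.Str.join "<br>" lines

-- ===== PORT B =====
-- Source B's "while p:" peel loop; the extra Nat argument is fuel making the recursion structural
-- (at the call site it is the padded string's length, which the loop never exhausts).
def pvPeelLines : Nat → List Char → List String
  | 0, _ => []
  | fuel + 1, p =>
    if p = [] then []
    else ("[" ++ String.ofList (p.take 12) ++ "][" ++ String.ofList ((p.drop 12).take 12) ++ "]")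
         :: pvPeelLines fuel (p.drop 24)

def format_behavior_legacy_py_alt (value : Option String) : String :=
  match value with
  | none => "-"
  | some v =>
    let raw := PySem.Str.strip (PySem.Str.replace v " " "")
    if raw ∈ (["", "-", "--", "N", "NN", "N/A"] : List String) then
      (if raw = "" then "-" else raw)
    else
      -- p = raw + "-" * (-len(raw) % 24)
      let p := raw.toList ++ List.replicate (PySem.Int.mod (-(PySem.Str.len raw)) 24).toNat '-'
      PySem.Str.join "<br>" (pvPeelLines p.length p)

-- ===== PRECONDITION & SPEC =====
def Spec_format_behavior_legacy_py (value : Option String) (out : String) : Prop := out = format_behavior_legacy_py_alt value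
instance (value : Option String) (out : String) : Decidable (Spec_format_behavior_legacy_py value out) := by unfold Spec_format_behavior_legacy_py; infer_instance

-- ===== CLAIM (what is proved, stated in full; the proofs are below) =====
def Claim_equal_format_behavior_legacy_py : Prop := ∀ (value : Option String), Dom_format_behavior_legacy_py value → Spec_format_behavior_legacy_py value (format_behavior_legacy_py value)

-- ===== LEMMAS AND PROOFS =====

-- the common normal form: line k shows chars 24k..24k+11 and 24k+12..24k+23 of raw, dash-padded to 12
def pvPadTake (m : List Char) : List Char := m.take 12 ++ List.replicate (12 - m.length) '-'

def pvLine (l : List Char) (k : Nat) : String :=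
  "[" ++ String.ofList (pvPadTake (l.drop (24 * k))) ++ "]["
      ++ String.ofList (pvPadTake (l.drop (24 * k + 12))) ++ "]"

theorem pvLjust_take (m : List Char) :
    m.take 12 ++ List.replicate (12 - (m.take 12).length) '-' = pvPadTake m := by
  unfold pvPadTake
  congr 2
  simp [List.length_take]
  omega

-- B's branch: peeling the padded list yields exactly the normal-form lines
theorem peel_eq (fuel : Nat) (l : List Char) (hf : (l.length + 23) / 24 ≤ fuel) :
    pvPeelLines fuel (l ++ List.replicate ((24 - l.length % 24) % 24) '-')
      = (List.range ((l.length + 23) / 24)).map (pvLine l) := by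
  induction fuel generalizing l with
  | zero =>
    have h0 : l.length = 0 := by omega
    have hl : l = [] := List.length_eq_zero_iff.mp h0
    simp [hl, pvPeelLines]
  | succ fuel ih =>
    by_cases hl : l = []
    · simp [hl, pvPeelLines]
    · have hm : 0 < l.length := List.length_pos_iff.mpr hl
      set m := l.length with hmd
      set c := (24 - m % 24) % 24 with hcd
      have hpne : l ++ List.replicate c '-' ≠ [] := by simp [hl]
      rw [pvPeelLines, if_neg hpne]
      have htake : (l ++ List.replicate c '-').take 12 = pvPadTake l := by
        rw [List.take_append, List.take_replicate]
        unfold pvPadTake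
        congr 2
        omega
      have hdroptake : ((l ++ List.replicate c '-').drop 12).take 12 = pvPadTake (l.drop 12) := by
        rw [List.drop_append, List.drop_replicate,
            List.take_append, List.take_replicate]
        unfold pvPadTake
        congr 2
        simp [List.length_drop]
        omega
      have hdrop24 : (l ++ List.replicate c '-').drop 24
          = l.drop 24 ++ List.replicate ((24 - (l.drop 24).length % 24) % 24) '-' := by
        rw [List.drop_append, List.drop_replicate]
        congr 2
        simp [List.length_drop]
        omega
      have hceil : (m + 23) / 24 = ((l.drop 24).length + 23) / 24 + 1 := by
        simp [List.length_drop]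
        omega
      rw [htake, hdroptake, hdrop24,
          ih (l.drop 24) (by simp [List.length_drop]; omega), hceil,
          List.range_succ_eq_map, List.map_cons, List.map_map]
      refine List.cons_eq_cons.mpr ⟨?_, ?_⟩
      · unfold pvLine
        norm_num
      · apply List.map_congr_left
        intro a _
        unfold pvLine
        simp only [Function.comp_apply, List.drop_drop]
        rw [(by ring : 24 + 24 * a = 24 * (a + 1)), (by ring : 24 + (24 * a + 12) = 24 * (a + 1) + 12)]

-- A's branch: the chunk/pair/ljust construction yields the same normal-form lines
set_option maxHeartbeats 2000000 in
theorem key_branch (raw : String) (h : raw.toList ≠ []) :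
    (let chunkLen : Int := 12
     let chunks := (PySem.List.pyRange 0 (PySem.Str.len raw) chunkLen).map
       (fun i => PySem.Str.slice raw (some i) (some (i + chunkLen)))
     if chunks = [] then "-"
     else
       let lines := (PySem.List.pyRange 0 (chunks.length : Int) 2).foldl
         (fun lines i =>
           let left := pvLjustDash (PySem.List.pyGetD chunks i "") 12
           let right := if i + 1 < (chunks.length : Int)
             then pvLjustDash (PySem.List.pyGetD chunks (i + 1) "") 12
             else String.ofList (List.replicate 12 '-')
           lines ++ ["[" ++ left ++ "][" ++ right ++ "]"]) []
       PySem.Str.join "<br>" lines)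
    = PySem.Str.join "<br>" ((List.range ((raw.toList.length + 23) / 24)).map (pvLine raw.toList)) := by
  have hN : 0 < raw.toList.length := List.length_pos_iff.mpr h
  have hn0 : (0:Int) < PySem.Str.len raw := by
    simpa [PySem.Str.len_eq] using (by exact_mod_cast hN : (0:Int) < (raw.toList.length : Int))
  set n := PySem.Str.len raw with hnd
  have hn : n = (raw.toList.length : Int) := by simp [hnd, PySem.Str.len_eq]
  have h12 : n - 0 + 12 - 1 = n + 11 := by ring
  simp only [PySem.List.pyRange_of_pos _ _ (by norm_num : (0:Int) < 12),
             PySem.List.pyRange_of_pos _ _ (by norm_num : (0:Int) < 2),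
             if_pos hn0, h12, List.map_map, List.length_map, List.length_range]
  set M : Nat := ((n + 11) / 12).toNat with hMd
  have hM0 : 0 < M := by omega
  rw [if_neg (by simp [List.map_eq_nil_iff, List.range_eq_nil]; omega)]
  rw [if_pos (by exact_mod_cast hM0 : (0:Int) < (M:Int))]
  have hMc : (M:Int) - 0 + 2 - 1 = (M:Int) + 1 := by ring
  rw [hMc]
  have hPQ : (((M:Int) + 1) / 2).toNat = (raw.toList.length + 23) / 24 := by omega
  rw [hPQ]
  set P : Nat := (raw.toList.length + 23) / 24 with hPd
  rw [List.foldl_map, PySem.List.foldl_append_eq_flatMap, ← List.map_eq_flatMap]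
  simp only [List.nil_append]
  refine congrArg _ (List.map_congr_left ?_)
  intro k hk
  rw [List.mem_range] at hk
  have hk2 : 2 * k < M := by omega
  have e2 : (0:Int) + 2 * (k:Int) = ((2 * k : Nat) : Int) := by push_cast; ring
  rw [e2]
  rw [PySem.List.pyGetD_of_nonneg _ _ (by positivity), Int.toNat_natCast,
      PySem.List.getD_map_range _ _ _ _ hk2]
  simp only [Function.comp_apply]
  unfold pvLine
  by_cases hc : 24 * k + 12 < raw.toList.length
  · rw [if_pos (by omega : ((2 * k : Nat) : Int) + 1 < (M:Int))]
    have e3 : ((2 * k : Nat) : Int) + 1 = ((2 * k + 1 : Nat) : Int) := by push_cast; ring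
    rw [e3, PySem.List.pyGetD_of_nonneg _ _ (by positivity), Int.toNat_natCast,
        PySem.List.getD_map_range _ _ _ _ (by omega : 2 * k + 1 < M)]
    simp only [Function.comp_apply]
    have a1 : (0:Int) + 12 * ((2 * k : Nat) : Int) = ((24 * k : Nat) : Int) := by push_cast; ring
    have a2 : (0:Int) + 12 * ((2 * k : Nat) : Int) + 12 = ((24 * k + 12 : Nat) : Int) := by push_cast; ring
    have a3 : (0:Int) + 12 * ((2 * k + 1 : Nat) : Int) = ((24 * k + 12 : Nat) : Int) := by push_cast; ring
    have a4 : (0:Int) + 12 * ((2 * k + 1 : Nat) : Int) + 12 = ((24 * k + 24 : Nat) : Int) := by push_cast; ring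
    rw [a2, a1, a4, a3]
    unfold pvLjustDash
    simp only [PySem.Str.toList_slice, PySem.Chars.slice_eq_listSlice, PySem.List.slice_natCast]
    have t1 : 24 * k + 12 - 24 * k = 12 := by omega
    have t2 : 24 * k + 24 - (24 * k + 12) = 12 := by omega
    rw [t1, t2, pvLjust_take, pvLjust_take]
  · rw [if_neg (by omega : ¬ ((2 * k : Nat) : Int) + 1 < (M:Int))]
    have a1 : (0:Int) + 12 * ((2 * k : Nat) : Int) = ((24 * k : Nat) : Int) := by push_cast; ring
    have a2 : (0:Int) + 12 * ((2 * k : Nat) : Int) + 12 = ((24 * k + 12 : Nat) : Int) := by push_cast; ring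
    rw [a2, a1]
    unfold pvLjustDash
    simp only [PySem.Str.toList_slice, PySem.Chars.slice_eq_listSlice, PySem.List.slice_natCast]
    have t1 : 24 * k + 12 - 24 * k = 12 := by omega
    rw [t1, pvLjust_take]
    have hnil : raw.toList.drop (24 * k + 12) = [] := List.drop_eq_nil_of_le (by omega)
    rw [hnil]
    unfold pvPadTake
    norm_num

theorem alt_branch (raw : String) (h : raw.toList ≠ []) :
    PySem.Str.join "<br>"
      (pvPeelLines (raw.toList ++ List.replicate (PySem.Int.mod (-(PySem.Str.len raw)) 24).toNat '-').length
        (raw.toList ++ List.replicate (PySem.Int.mod (-(PySem.Str.len raw)) 24).toNat '-'))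
      = PySem.Str.join "<br>" ((List.range ((raw.toList.length + 23) / 24)).map (pvLine raw.toList)) := by
  have hc : (PySem.Int.mod (-(PySem.Str.len raw)) 24).toNat = (24 - raw.toList.length % 24) % 24 := by
    rw [PySem.Int.mod_eq_emod_of_pos (by norm_num), PySem.Str.len_eq]
    omega
  have hm := List.length_pos_iff.mpr h
  rw [hc]
  exact congrArg _ (peel_eq _ _ (by simp [List.length_append]; omega))

-- ===== VERDICT (by name: the statement is the Claim_ definition above) =====
theorem format_behavior_legacy_py_spec : Claim_equal_format_behavior_legacy_py := by
  intro value _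
  unfold Spec_format_behavior_legacy_py format_behavior_legacy_py format_behavior_legacy_py_alt
  cases value with
  | none => rfl
  | some v =>
    simp only
    set raw := PySem.Str.strip (PySem.Str.replace v " " "") with hraw
    by_cases hg : raw ∈ (["", "-", "--", "N", "NN", "N/A"] : List String)
    · simp [hg]
    · simp only [hg, if_false]
      have hne : raw.toList ≠ [] := by
        intro hnil
        apply hg
        have : raw = "" := by
          have := congrArg String.ofList hnil
          simpa using this
        simp [this]
      exact (key_branch raw hne).trans (alt_branch raw hne).symm
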